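-- pv_equiv track=rewrite | github.com/FedorSannikov1988/Getting_to_know_Python | homework4/main4.py | sum_list_items
-- ===== SOURCE A (Python) =====
-- def sum_list_items(list_one: list, list_two: list) -> list:
--
--     if len(list_one) > len(list_two):
--         main_list = list_one[:]
--     elif len(list_one) < len(list_two):
--         main_list = list_two[:]
--     else:
--         main_list = list_one[:]
--
--     for count in range(0, min(len(list_one), len(list_two)), 1):
--         main_list[count] = list_one[count] + list_two[count]
--
--     return main_list
-- ===== SOURCE B (Python) =====
-- def sum_list_items(list_one: list, list_two: list) -> list:
--     it1, it2 = iter(list_one), iter(list_two)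
--     out = []
--     while True:
--         try:
--             x = next(it1)
--         except StopIteration:
--             return out + list(it2)
--         try:
--             y = next(it2)
--         except StopIteration:
--             return out + [x] + list(it1)
--         out.append(x + y)
-- ===== Notes on version B (the rewrite author's own statement) =====
-- stated objective: alternative
-- what changed: B co-consumes the two lists with a pair of iterators, appending pairwise sums to an accumulator until one iterator is exhausted and then returning the accumulator plus the other iterator's remainder, instead of A's copy-the-longer-list-then-overwrite-its-prefix-by-index loop (no len, min, indexing or slicing).
import Mathlib
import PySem

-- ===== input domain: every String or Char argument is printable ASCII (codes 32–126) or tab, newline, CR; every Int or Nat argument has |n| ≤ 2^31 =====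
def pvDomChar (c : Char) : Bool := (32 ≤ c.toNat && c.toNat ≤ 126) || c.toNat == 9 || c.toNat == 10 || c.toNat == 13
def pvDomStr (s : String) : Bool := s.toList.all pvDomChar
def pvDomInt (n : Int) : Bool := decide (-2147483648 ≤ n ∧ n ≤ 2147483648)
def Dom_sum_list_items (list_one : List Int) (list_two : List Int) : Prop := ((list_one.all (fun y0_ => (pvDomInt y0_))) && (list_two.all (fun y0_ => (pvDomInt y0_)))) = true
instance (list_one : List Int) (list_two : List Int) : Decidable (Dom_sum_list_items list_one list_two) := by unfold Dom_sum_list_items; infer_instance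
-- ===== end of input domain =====

-- B co-consumes the two lists in lock-step with an accumulator, returning the
-- remainder of the unexhausted side, instead of A's copy-the-longer-list-and
-- -overwrite-its-prefix-by-index loop (alternative decomposition, same cost).

-- ===== PORT A =====
def sum_list_items (list_one : List Int) (list_two : List Int) : List Int :=
  let main_list :=
    if list_one.length > list_two.length then list_one
    else if list_one.length < list_two.length then list_two
    else list_one
  (PySem.List.pyRange 0 (min (list_one.length : Int) (list_two.length : Int)) 1).foldl
    (fun ml count =>
      PySem.List.pySetD ml count
        (PySem.List.pyGetD list_one count 0 + PySem.List.pyGetD list_two count 0))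
    main_list

-- ===== PORT B =====
-- Source B's while-True loop over two iterators: state = (out, rest1, rest2);
-- StopIteration on it1 → out ++ rest2; StopIteration on it2 → out ++ [x] ++ rest1.
def sumLoop (out : List Int) : List Int → List Int → List Int
  | [], rest2 => out ++ rest2
  | x :: rest1, [] => out ++ [x] ++ rest1
  | x :: rest1, y :: rest2 => sumLoop (out ++ [x + y]) rest1 rest2

def sum_list_items_alt (list_one : List Int) (list_two : List Int) : List Int :=
  sumLoop [] list_one list_two

-- ===== PRECONDITION & SPEC =====
def Spec_sum_list_items (list_one : List Int) (list_two : List Int) (out : List Int) : Prop := out = sum_list_items_alt list_one list_two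
instance (list_one : List Int) (list_two : List Int) (out : List Int) : Decidable (Spec_sum_list_items list_one list_two out) := by unfold Spec_sum_list_items; infer_instance

-- ===== CLAIM (what is proved, stated in full; the proofs are below) =====
def Claim_equal_sum_list_items : Prop := ∀ (list_one : List Int) (list_two : List Int), Dom_sum_list_items list_one list_two → Spec_sum_list_items list_one list_two (sum_list_items list_one list_two)

-- ===== LEMMAS AND PROOFS =====

-- A's overwrite loop over range(0, n) equals the mapped prefix followed by the untouched tail.
lemma foldl_set_eq_map_append (f : Int → Int) :
    ∀ (n : Nat) (ml : List Int), n ≤ ml.length →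
    (PySem.List.pyRange 0 (n : Int) 1).foldl
      (fun ml c => PySem.List.pySetD ml c (f c)) ml
    = ((PySem.List.pyRange 0 (n : Int) 1).map f) ++ ml.drop n := by
  intro n
  induction n with
  | zero => intro ml _; simp [PySem.List.pyRange_one_eq_nil]
  | succ n ih =>
    intro ml h
    have hcast : ((n + 1 : Nat) : Int) = (n : Int) + 1 := by push_cast; ring
    rw [hcast, PySem.List.pyRange_one_succ_right (by positivity),
        List.foldl_append, List.map_append, ih ml (by omega)]
    simp only [List.foldl_cons, List.foldl_nil, List.map_cons, List.map_nil,
      PySem.List.pySetD_natCast]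
    have hlen : ((PySem.List.pyRange 0 (n : Int) 1).map f).length = n := by
      simp [PySem.List.length_pyRange_one]
    rw [List.set_append_right _ _ (by omega)]
    rw [hlen]
    simp only [Nat.sub_self]
    conv_lhs => rw [List.drop_eq_getElem_cons (show n < ml.length by omega)]
    rw [List.set_cons_zero, List.append_assoc, List.singleton_append]

-- The summed prefix A computes is the elementwise zipWith of the two lists.
lemma map_pyRange_sum_eq_zipWith (xs ys : List Int) :
    ((PySem.List.pyRange 0 ((min xs.length ys.length : Nat) : Int) 1).map
      (fun i => PySem.List.pyGetD xs i 0 + PySem.List.pyGetD ys i 0))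
    = List.zipWith (· + ·) xs ys := by
  apply List.ext_getElem
  · simp [PySem.List.length_pyRange_one]; omega
  · intro i h1 h2
    have hi : i < min xs.length ys.length := by
      simp [PySem.List.length_pyRange_one] at h1; omega
    simp only [List.getElem_map, PySem.List.getElem_pyRange_one, zero_add,
      List.getElem_zipWith]
    rw [PySem.List.pyGetD_natCast, PySem.List.pyGetD_natCast]
    rw [List.getD_eq_getElem _ _ (by omega), List.getD_eq_getElem _ _ (by omega)]

-- B's loop with accumulator: zipWith prefix, then the unexhausted remainder.
lemma sumLoop_eq :
    ∀ (xs ys out : List Int),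
    sumLoop out xs ys
    = out ++ List.zipWith (· + ·) xs ys ++ (xs.drop ys.length ++ ys.drop xs.length) := by
  intro xs
  induction xs with
  | nil => intro ys out; simp [sumLoop]
  | cons x rest1 ih =>
    intro ys out
    cases ys with
    | nil => simp [sumLoop]
    | cons y rest2 =>
      rw [sumLoop, ih]
      simp

theorem sum_list_items_spec : Claim_equal_sum_list_items := by
  intro l1 l2 _
  unfold Spec_sum_list_items sum_list_items sum_list_items_alt
  rw [sumLoop_eq, List.nil_append]
  have hmin : min (l1.length : Int) (l2.length : Int) = ((min l1.length l2.length : Nat) : Int) := by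
    push_cast; rfl
  rcases lt_trichotomy l1.length l2.length with h | h | h
  · have hn : min l1.length l2.length = l1.length := by omega
    rw [if_neg (show ¬ l1.length > l2.length by omega), if_pos h, hmin,
        foldl_set_eq_map_append _ (min l1.length l2.length) l2 (by omega),
        map_pyRange_sum_eq_zipWith, hn,
        List.drop_eq_nil_of_le (as := l1) (show l1.length ≤ l2.length by omega)]
    simp
  · have hn : min l1.length l2.length = l1.length := by omega
    rw [if_neg (show ¬ l1.length > l2.length by omega),
        if_neg (show ¬ l1.length < l2.length by omega), hmin,
        foldl_set_eq_map_append _ (min l1.length l2.length) l1 (by omega),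
        map_pyRange_sum_eq_zipWith, hn]
    simp [h, List.drop_eq_nil_of_le]
  · have hn : min l1.length l2.length = l2.length := by omega
    rw [if_pos (show l1.length > l2.length by omega), hmin,
        foldl_set_eq_map_append _ (min l1.length l2.length) l1 (by omega),
        map_pyRange_sum_eq_zipWith, hn]
    rw [List.drop_eq_nil_of_le (as := l2) (show l2.length ≤ l1.length by omega)]
    simp
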